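-- pv_equiv track=rewrite | github.com/delguerso1/CT-Supera | usuarios/serializers.py | _formatar_nome
-- ===== SOURCE A (Python) =====
-- def _formatar_nome(valor):
--     if not valor:
--         return valor
--     partes = [p for p in valor.strip().split(' ') if p]
--     partes_formatadas = []
--     for parte in partes:
--         subpartes = [sp for sp in parte.split('-') if sp]
--         subpartes_formatadas = [
--             sp[0].upper() + sp[1:].lower() if sp else ''
--             for sp in subpartes
--         ]
--         partes_formatadas.append('-'.join(subpartes_formatadas))
--     return ' '.join(partes_formatadas)
-- ===== SOURCE B (Python) =====
-- def _formatar_nome(valor):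
--     if not valor:
--         return valor
--     out = []
--     has_letter = False
--     pending = False
--     prev_space = False
--     for ch in valor.strip():
--         if ch == ' ':
--             if not prev_space:
--                 out.append(' ')
--             has_letter = False
--             pending = False
--             prev_space = True
--         elif ch == '-':
--             pending = True
--             prev_space = False
--         else:
--             if has_letter and pending:
--                 out.append('-')
--             out.append(ch.lower() if has_letter and not pending else ch.upper())
--             pending = False
--             prev_space = False
--             has_letter = True
--     return ''.join(out)
-- ===== Notes on version B (the rewrite author's own statement) =====
-- stated objective: alternative
-- what changed: Replaced the two-level pipeline (strip, split on spaces, per part split on hyphens, filter empties, capitalize, join back) with a single left-to-right character scan over the stripped string that tracks has-letter/pending-hyphen/previous-space flags and emits separators lazily.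
import Mathlib
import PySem

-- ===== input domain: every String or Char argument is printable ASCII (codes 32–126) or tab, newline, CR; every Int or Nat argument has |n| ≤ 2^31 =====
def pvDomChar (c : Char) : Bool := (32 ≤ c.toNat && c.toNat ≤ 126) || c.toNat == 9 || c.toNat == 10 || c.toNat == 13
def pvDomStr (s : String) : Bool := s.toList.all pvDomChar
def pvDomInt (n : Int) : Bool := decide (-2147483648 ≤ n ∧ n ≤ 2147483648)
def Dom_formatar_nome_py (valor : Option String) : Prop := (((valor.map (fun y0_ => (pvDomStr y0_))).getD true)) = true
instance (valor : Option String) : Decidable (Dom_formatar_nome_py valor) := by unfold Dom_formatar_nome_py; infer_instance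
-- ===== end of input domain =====

-- B replaces A's two-level split/filter/capitalize/join pipeline by a single left-to-right
-- character scan with lazily-emitted separators (alternative decomposition).

-- ===== PORT A =====
-- 'sp[0].upper() + sp[1:].lower() if sp else '''  (upper/lower exact on the ASCII domain)
def pvCapA (sp : List Char) : List Char :=
  if !sp.isEmpty then
    (match PySem.List.pyGet? sp 0 with
     | some c => PySem.Chars.upper [c]
     | none => []) ++ PySem.Chars.lower (PySem.List.slice sp (some 1) none)
  else []

def pvParteA (parte : List Char) : List Char :=
  let subpartes := (PySem.Chars.splitOn parte ['-']).filter (fun sp => !sp.isEmpty)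
  PySem.Chars.join ['-'] (subpartes.map pvCapA)

def formatar_nome_py (valor : Option String) : Option String :=
  match valor with
  | none => none
  | some s =>
    if s.toList.isEmpty then some s
    else
      let partes := (PySem.Chars.splitOn (PySem.Chars.strip s.toList) [' ']).filter (fun p => !p.isEmpty)
      some (String.ofList (PySem.Chars.join [' ']
        (partes.foldl (fun acc parte => acc ++ [pvParteA parte]) [])))

-- ===== PORT B =====
-- scan state: (out, has_letter, pending_hyphen, prev_space)
def pvStepB (st : List Char × Bool × Bool × Bool) (ch : Char) : List Char × Bool × Bool × Bool :=
  if ch = ' ' then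
    ((if !st.2.2.2 then st.1 ++ [' '] else st.1), false, false, true)
  else if ch = '-' then
    (st.1, st.2.1, true, false)
  else
    ((if st.2.1 && st.2.2.1 then st.1 ++ ['-'] else st.1) ++
      [if st.2.1 && !st.2.2.1 then PySem.Chars.lowerChar ch else PySem.Chars.upperChar ch],
      true, false, false)

def formatar_nome_py_alt (valor : Option String) : Option String :=
  match valor with
  | none => none
  | some s =>
    if s.toList.isEmpty then some s
    else
      some (String.ofList ((PySem.Chars.strip s.toList).foldl pvStepB ([], false, false, false)).1)

-- ===== PRECONDITION & SPEC =====
def Spec_formatar_nome_py (valor : Option String) (out : Option String) : Prop := out = formatar_nome_py_alt valor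
instance (valor : Option String) (out : Option String) : Decidable (Spec_formatar_nome_py valor out) := by unfold Spec_formatar_nome_py; infer_instance

-- ===== CLAIM (what is proved, stated in full; the proofs are below) =====
def Claim_equal_formatar_nome_py : Prop := ∀ (valor : Option String), Dom_formatar_nome_py valor → Spec_formatar_nome_py valor (formatar_nome_py valor)

-- ===== LEMMAS AND PROOFS =====

-- PySem.Chars.splitOn with a one-character separator is Mathlib's List.splitOn
theorem pvModifyHead_id {α : Type} (l : List α) : List.modifyHead (fun t => t) l = l := by
  cases l <;> rfl

theorem pvGo_eq (c : Char) : ∀ (fuel : Nat) (l cur : List Char) (acc : List (List Char)), l.length < fuel →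
    PySem.Chars.splitOn.go [c] fuel l cur acc
      = acc.reverse ++ (List.splitOn c l).modifyHead (fun t => cur.reverse ++ t) := by
  intro fuel
  induction fuel with
  | zero => intro l cur acc h; omega
  | succ f ih =>
    intro l cur acc h
    cases l with
    | nil =>
      simp [PySem.Chars.splitOn.go, List.splitOn, List.splitOnP_nil]
    | cons x rest =>
      rw [PySem.Chars.splitOn.go]
      by_cases hx : x = c
      · subst hx
        have hpre : [x].isPrefixOf (x :: rest) = true := by simp [List.isPrefixOf]
        simp only [hpre, if_true, List.length_singleton, List.drop_one, List.tail_cons]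
        rw [ih rest [] (cur.reverse :: acc) (by simp at h ⊢; omega)]
        have hR : List.splitOn x (x :: rest) = [] :: List.splitOn x rest := by
          simp [List.splitOn, List.splitOnP_cons]
        rw [hR]
        simp [pvModifyHead_id]
      · have hpre : [c].isPrefixOf (x :: rest) = false := by
          simp [List.isPrefixOf]; exact fun hcx => absurd hcx.symm hx
        simp only [hpre, Bool.false_eq_true, if_false]
        rw [ih rest (x :: cur) acc (by simp at h ⊢; omega)]
        have hR : List.splitOn c (x :: rest) = (List.splitOn c rest).modifyHead (List.cons x) := by
          simp [List.splitOn, List.splitOnP_cons, hx]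
        rw [hR, List.modifyHead_modifyHead]
        have hfe : (fun t => (x :: cur).reverse ++ t) = ((fun t => cur.reverse ++ t) ∘ List.cons x) := by
          funext t; simp
        rw [hfe]

theorem pvSplitOn_eq (cs : List Char) (c : Char) :
    PySem.Chars.splitOn cs [c] = List.splitOn c cs := by
  rw [PySem.Chars.splitOn, pvGo_eq c (cs.length + 1) cs [] [] (Nat.lt_succ_self _)]
  simp [pvModifyHead_id]

theorem pvSplit_append (sep : Char) (a r : List Char) (h : ∀ x ∈ a, x ≠ sep) :
    List.splitOn sep (a ++ r) = (List.splitOn sep r).modifyHead (fun t => a ++ t) := by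
  induction a with
  | nil => simp [pvModifyHead_id]
  | cons x a' ih =>
    have hx : (x == sep) = false := by simp [h x (by simp)]
    simp only [List.cons_append, List.splitOn, List.splitOnP_cons, hx, Bool.false_eq_true, if_false]
    rw [show List.splitOnP (fun y => y == sep) (a' ++ r) = List.splitOn sep (a' ++ r) from rfl,
      ih (fun y hy => h y (by simp [hy])), List.modifyHead_modifyHead]
    congr 1

-- splitOn across a separator-free prefix moved above

-- word list (outer level) and subpart list (inner level)
def pvW (cs : List Char) : List (List Char) :=
  (List.splitOn ' ' cs).filter (fun p => !p.isEmpty)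

def pvSP (w : List Char) : List (List Char) :=
  (List.splitOn '-' w).filter (fun p => !p.isEmpty)

theorem pvParteA_eq (w : List Char) :
    pvParteA w = PySem.Chars.join ['-'] ((pvSP w).map pvCapA) := by
  simp only [pvParteA, pvSplitOn_eq, pvSP]

theorem pvCapA_cons (c : Char) (a : List Char) :
    pvCapA (c :: a) = PySem.Chars.upperChar c :: PySem.Chars.lower a := by
  simp [pvCapA, PySem.List.pyGet?, PySem.List.pyIdx?, PySem.List.slice,
    PySem.Chars.upper, PySem.Chars.lower]

theorem pvSP_hyphen (w : List Char) : pvSP ('-' :: w) = pvSP w := by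
  simp [pvSP, List.splitOn, List.splitOnP_cons]

theorem pvW_space (cs : List Char) : pvW (' ' :: cs) = pvW cs := by
  simp [pvW, List.splitOn, List.splitOnP_cons]

theorem pvSP_block (a r : List Char) (ha : a ≠ []) (h : ∀ x ∈ a, x ≠ '-')
    (hr : r = [] ∨ r.head? = some '-') : pvSP (a ++ r) = a :: pvSP r := by
  unfold pvSP
  rw [pvSplit_append '-' a r h]
  rcases hr with hr | hr
  · subst hr
    simp [List.splitOn, List.splitOnP_nil, ha]
  · cases r with
    | nil => simp at hr
    | cons x r' =>
      cases hr
      simp only [List.splitOn, List.splitOnP_cons, beq_self_eq_true, if_true,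
        List.modifyHead_cons, List.append_nil]
      simp [ha]

theorem pvW_block (a r : List Char) (ha : a ≠ []) (h : ∀ x ∈ a, x ≠ ' ')
    (hr : r = [] ∨ r.head? = some ' ') : pvW (a ++ r) = a :: pvW r := by
  unfold pvW
  rw [pvSplit_append ' ' a r h]
  rcases hr with hr | hr
  · subst hr
    simp [List.splitOn, List.splitOnP_nil, ha]
  · cases r with
    | nil => simp at hr
    | cons x r' =>
      cases hr
      simp only [List.splitOn, List.splitOnP_cons, beq_self_eq_true, if_true,
        List.modifyHead_cons, List.append_nil]
      simp [ha]

theorem pvW_ne_nil (t : List Char) (ht : t ≠ []) (hh : t.head? ≠ some ' ') : pvW t ≠ [] := by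
  cases t with
  | nil => exact absurd rfl ht
  | cons c t' =>
    have hc : (c == ' ') = false := by
      simp only [List.head?_cons] at hh; simp; intro h; exact hh (by rw [h])
    unfold pvW
    simp only [List.splitOn, List.splitOnP_cons, hc, Bool.false_eq_true, if_false]
    obtain ⟨hd, tl, hE⟩ := List.exists_cons_of_ne_nil (List.splitOnP_ne_nil (fun x => x == ' ') t')
    rw [hE]
    simp

-- A's rendered word and its continuation form
def pvG (w : List Char) : List Char := PySem.Chars.join ['-'] ((pvSP w).map pvCapA)
def pvGC (w : List Char) : List Char := if pvSP w = [] then [] else '-' :: pvG w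
def pvF (cs : List Char) : List Char := PySem.Chars.join [' '] ((pvW cs).map pvParteA)

-- scan runs
theorem pvScan_lowers (a : List Char) (h : ∀ x ∈ a, x ≠ ' ' ∧ x ≠ '-') (out : List Char) :
    a.foldl pvStepB (out, true, false, false) = (out ++ PySem.Chars.lower a, true, false, false) := by
  induction a generalizing out with
  | nil => simp [PySem.Chars.lower]
  | cons x a' ih =>
    have hx := h x (by simp)
    rw [List.foldl_cons]
    have hstep : pvStepB (out, true, false, false) x = (out ++ [PySem.Chars.lowerChar x], true, false, false) := by
      simp [pvStepB, hx.1, hx.2]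
    rw [hstep, ih (fun y hy => h y (by simp [hy]))]
    simp [PySem.Chars.lower]

theorem pvScan_capFresh (c : Char) (a : List Char) (hc : c ≠ ' ' ∧ c ≠ '-')
    (h : ∀ x ∈ a, x ≠ ' ' ∧ x ≠ '-') (out : List Char) (pd ps : Bool) :
    (c :: a).foldl pvStepB (out, false, pd, ps)
      = (out ++ PySem.Chars.upperChar c :: PySem.Chars.lower a, true, false, false) := by
  rw [List.foldl_cons]
  have hstep : pvStepB (out, false, pd, ps) c = (out ++ [PySem.Chars.upperChar c], true, false, false) := by
    simp [pvStepB, hc.1, hc.2]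
  rw [hstep, pvScan_lowers a h]
  simp

theorem pvScan_capHyph (c : Char) (a : List Char) (hc : c ≠ ' ' ∧ c ≠ '-')
    (h : ∀ x ∈ a, x ≠ ' ' ∧ x ≠ '-') (out : List Char) :
    (c :: a).foldl pvStepB (out, true, true, false)
      = (out ++ '-' :: PySem.Chars.upperChar c :: PySem.Chars.lower a, true, false, false) := by
  rw [List.foldl_cons]
  have hstep : pvStepB (out, true, true, false) c = (out ++ ['-', PySem.Chars.upperChar c], true, false, false) := by
    simp [pvStepB, hc.1, hc.2]
  rw [hstep, pvScan_lowers a h]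
  simp

theorem pvScan_spaces_tail (ss : List Char) (h : ∀ x ∈ ss, x = ' ') (out : List Char) :
    ss.foldl pvStepB (out, false, false, true) = (out, false, false, true) := by
  induction ss with
  | nil => rfl
  | cons y ss' ih =>
    have hy := h y (by simp); subst hy
    rw [List.foldl_cons]
    have hstep : pvStepB (out, false, false, true) ' ' = (out, false, false, true) := by
      simp [pvStepB]
    rw [hstep]
    exact ih (fun z hz => h z (by simp [hz]))

theorem pvScan_spaces (ss : List Char) (h : ∀ x ∈ ss, x = ' ') (hne : ss ≠ [])
    (out : List Char) (hl pd : Bool) :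
    ss.foldl pvStepB (out, hl, pd, false) = (out ++ [' '], false, false, true) := by
  cases ss with
  | nil => exact absurd rfl hne
  | cons x ss' =>
    have hx := h x (by simp); subst hx
    rw [List.foldl_cons]
    have hstep : pvStepB (out, hl, pd, false) ' ' = (out ++ [' '], false, false, true) := by
      simp [pvStepB]
    rw [hstep]
    exact pvScan_spaces_tail ss' (fun z hz => h z (by simp [hz])) _

-- word-structure facts for A's rendering
theorem pvSP_nil : pvSP [] = [] := by
  simp [pvSP, List.splitOn, List.splitOnP_nil]

theorem pvGC_nil : pvGC [] = [] := by simp [pvGC, pvSP_nil]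

theorem pvGC_hyphen (r : List Char) : pvGC ('-' :: r) = pvGC r := by
  simp [pvGC, pvG, pvSP_hyphen]

theorem pvG_hyphen (r : List Char) : pvG ('-' :: r) = pvG r := by
  simp [pvG, pvSP_hyphen]

theorem pvGword (c : Char) (a r : List Char) (hc : c ≠ ' ' ∧ c ≠ '-')
    (ha : ∀ x ∈ a, x ≠ ' ' ∧ x ≠ '-') (hr : r = [] ∨ r.head? = some '-') :
    pvG ((c :: a) ++ r) = (PySem.Chars.upperChar c :: PySem.Chars.lower a) ++ pvGC r ∧
      pvSP ((c :: a) ++ r) ≠ [] := by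
  have hblk : pvSP ((c :: a) ++ r) = (c :: a) :: pvSP r := by
    apply pvSP_block _ _ (by simp) _ hr
    intro x hx
    rcases List.mem_cons.mp hx with h1 | h2
    · exact h1 ▸ hc.2
    · exact (ha x h2).2
  refine ⟨?_, by rw [hblk]; simp⟩
  rw [pvG, hblk, List.map_cons, pvCapA_cons]
  by_cases hsp : pvSP r = []
  · rw [hsp]
    simp [PySem.Chars.join_singleton, pvGC, hsp]
  · obtain ⟨q, rest, hq⟩ := List.exists_cons_of_ne_nil hsp
    rw [hq, List.map_cons, PySem.Chars.join_cons_cons]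
    simp [pvGC, pvG, hq]

-- main word-level scan lemma ((A): fresh state; (C): state (true,true,false))
theorem pvScan_word : ∀ (n : Nat) (w : List Char), w.length ≤ n → (∀ x ∈ w, x ≠ ' ') →
    ((w ≠ [] → ∀ (out : List Char) (pd ps : Bool), ∃ hl' pd',
        w.foldl pvStepB (out, false, pd, ps) = (out ++ pvG w, hl', pd', false)) ∧
     (∀ (out : List Char), ∃ hl' pd',
        w.foldl pvStepB (out, true, true, false) = (out ++ pvGC w, hl', pd', false))) := by
  intro n
  induction n with
  | zero =>
    intro w hlen hsp
    have hw : w = [] := List.eq_nil_of_length_eq_zero (Nat.le_zero.mp hlen)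
    subst hw
    exact ⟨fun hne => absurd rfl hne, fun out => ⟨true, true, by simp [pvGC_nil]⟩⟩
  | succ m ih =>
    intro w hlen hsp
    constructor
    · -- (A) from the fresh state
      intro hne out pd ps
      cases w with
      | nil => exact absurd rfl hne
      | cons c w' =>
        have hlen' : w'.length ≤ m := by simp at hlen; omega
        have hsp' : ∀ x ∈ w', x ≠ ' ' := fun x hx => hsp x (by simp [hx])
        by_cases hcd : c = '-'
        · subst hcd
          rw [List.foldl_cons]
          have hstep : pvStepB (out, false, pd, ps) '-' = (out, false, true, false) := by
            simp [pvStepB]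
          rw [hstep, pvG_hyphen]
          cases hw' : w' with
          | nil =>
            refine ⟨false, true, ?_⟩
            simp [pvG, pvSP_nil, PySem.Chars.join_nil]
          | cons d w'' =>
            subst hw'
            exact (ih (d :: w'') hlen' hsp').1 (by simp) out true false
        · have hc : c ≠ ' ' ∧ c ≠ '-' := ⟨hsp c (by simp), hcd⟩
          set p : Char → Bool := fun x => !(x == ' ') && !(x == '-') with hp
          have hdec : w' = w'.takeWhile p ++ w'.dropWhile p := (List.takeWhile_append_dropWhile).symm
          set a := w'.takeWhile p with hadef
          set r := w'.dropWhile p with hrdef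
          have haa : ∀ x ∈ a, x ≠ ' ' ∧ x ≠ '-' := by
            intro x hx
            have := List.mem_takeWhile_imp hx
            simp [hp] at this
            exact this
          have hrhead : r = [] ∨ ∃ r₁, r = '-' :: r₁ := by
            cases hr : r with
            | nil => exact Or.inl rfl
            | cons x r₁ =>
              right
              have h1 := List.head?_dropWhile_not p w'
              rw [← hrdef, hr] at h1
              simp only [List.head?_cons] at h1
              have hxw : x ∈ w' := by
                have hxm : x ∈ a ++ r := by rw [hr]; simp
                rw [← hdec] at hxm; exact hxm
              simp [hp] at h1
              exact ⟨r₁, by rw [h1 (hsp' x hxw)]⟩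
          have hrh : r = [] ∨ r.head? = some '-' := by
            rcases hrhead with h | ⟨r₁, h⟩
            · exact Or.inl h
            · exact Or.inr (by rw [h]; rfl)
          have hGw := pvGword c a r hc haa hrh
          have hfold : (c :: w').foldl pvStepB (out, false, pd, ps)
              = r.foldl pvStepB ((c :: a).foldl pvStepB (out, false, pd, ps)) := by
            conv_lhs => rw [show c :: w' = (c :: a) ++ r by rw [List.cons_append, ← hdec]]
            rw [List.foldl_append]
          rw [hfold, pvScan_capFresh c a hc haa out pd ps]
          rw [show c :: w' = (c :: a) ++ r by rw [List.cons_append, ← hdec], hGw.1]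
          rcases hrhead with hrnil | ⟨r₁, hr1⟩
          · rw [hrnil]
            refine ⟨true, false, ?_⟩
            simp [pvGC_nil]
          · rw [hr1, List.foldl_cons]
            have hstep : pvStepB (out ++ PySem.Chars.upperChar c :: PySem.Chars.lower a, true, false, false) '-'
                = (out ++ PySem.Chars.upperChar c :: PySem.Chars.lower a, true, true, false) := by
              simp [pvStepB]
            rw [hstep]
            have hlen₁ : r₁.length ≤ m := by
              have h2 : a.length + r.length = w'.length := by
                rw [hdec]; simp
              rw [hr1] at h2; simp at h2; omega
            have hsp₁ : ∀ x ∈ r₁, x ≠ ' ' := by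
              intro x hx
              apply hsp' x
              rw [hdec, hr1]; simp [hx]
            obtain ⟨hl', pd', hC⟩ := (ih r₁ hlen₁ hsp₁).2 (out ++ PySem.Chars.upperChar c :: PySem.Chars.lower a)
            refine ⟨hl', pd', ?_⟩
            rw [hC, pvGC_hyphen]
            simp
    · -- (C) from state (true, true, false)
      intro out
      cases w with
      | nil => exact ⟨true, true, by simp [pvGC_nil]⟩
      | cons c w' =>
        have hlen' : w'.length ≤ m := by simp at hlen; omega
        have hsp' : ∀ x ∈ w', x ≠ ' ' := fun x hx => hsp x (by simp [hx])
        by_cases hcd : c = '-'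
        · subst hcd
          rw [List.foldl_cons]
          have hstep : pvStepB (out, true, true, false) '-' = (out, true, true, false) := by
            simp [pvStepB]
          rw [hstep, pvGC_hyphen]
          exact (ih w' hlen' hsp').2 out
        · have hc : c ≠ ' ' ∧ c ≠ '-' := ⟨hsp c (by simp), hcd⟩
          set p : Char → Bool := fun x => !(x == ' ') && !(x == '-') with hp
          have hdec : w' = w'.takeWhile p ++ w'.dropWhile p := (List.takeWhile_append_dropWhile).symm
          set a := w'.takeWhile p with hadef
          set r := w'.dropWhile p with hrdef
          have haa : ∀ x ∈ a, x ≠ ' ' ∧ x ≠ '-' := by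
            intro x hx
            have := List.mem_takeWhile_imp hx
            simp [hp] at this
            exact this
          have hrhead : r = [] ∨ ∃ r₁, r = '-' :: r₁ := by
            cases hr : r with
            | nil => exact Or.inl rfl
            | cons x r₁ =>
              right
              have h1 := List.head?_dropWhile_not p w'
              rw [← hrdef, hr] at h1
              simp only [List.head?_cons] at h1
              have hxw : x ∈ w' := by
                have hxm : x ∈ a ++ r := by rw [hr]; simp
                rw [← hdec] at hxm; exact hxm
              simp [hp] at h1
              exact ⟨r₁, by rw [h1 (hsp' x hxw)]⟩
          have hrh : r = [] ∨ r.head? = some '-' := by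
            rcases hrhead with h | ⟨r₁, h⟩
            · exact Or.inl h
            · exact Or.inr (by rw [h]; rfl)
          have hGw := pvGword c a r hc haa hrh
          have hGCw : pvGC ((c :: a) ++ r)
              = '-' :: ((PySem.Chars.upperChar c :: PySem.Chars.lower a) ++ pvGC r) := by
            rw [pvGC, if_neg hGw.2, hGw.1]
          have hfold : (c :: w').foldl pvStepB (out, true, true, false)
              = r.foldl pvStepB ((c :: a).foldl pvStepB (out, true, true, false)) := by
            conv_lhs => rw [show c :: w' = (c :: a) ++ r by rw [List.cons_append, ← hdec]]
            rw [List.foldl_append]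
          rw [hfold, pvScan_capHyph c a hc haa out]
          rw [show c :: w' = (c :: a) ++ r by rw [List.cons_append, ← hdec], hGCw]
          rcases hrhead with hrnil | ⟨r₁, hr1⟩
          · rw [hrnil]
            refine ⟨true, false, ?_⟩
            simp [pvGC_nil]
          · rw [hr1, List.foldl_cons]
            have hstep : pvStepB (out ++ '-' :: PySem.Chars.upperChar c :: PySem.Chars.lower a, true, false, false) '-'
                = (out ++ '-' :: PySem.Chars.upperChar c :: PySem.Chars.lower a, true, true, false) := by
              simp [pvStepB]
            rw [hstep]
            have hlen₁ : r₁.length ≤ m := by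
              have h2 : a.length + r.length = w'.length := by
                rw [hdec]; simp
              rw [hr1] at h2; simp at h2; omega
            have hsp₁ : ∀ x ∈ r₁, x ≠ ' ' := by
              intro x hx
              apply hsp' x
              rw [hdec, hr1]; simp [hx]
            obtain ⟨hl', pd', hC⟩ := (ih r₁ hlen₁ hsp₁).2 (out ++ '-' :: PySem.Chars.upperChar c :: PySem.Chars.lower a)
            refine ⟨hl', pd', ?_⟩
            rw [hC, pvGC_hyphen]
            simp

-- full scan = A's pipeline
theorem pvW_nil : pvW [] = [] := by
  simp [pvW, List.splitOn, List.splitOnP_nil]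

theorem pvW_spaces_prefix (ss : List Char) (h : ∀ x ∈ ss, x = ' ') (t : List Char) :
    pvW (ss ++ t) = pvW t := by
  induction ss with
  | nil => rfl
  | cons x ss' ih =>
    have hx := h x (by simp); subst hx
    rw [List.cons_append, pvW_space]
    exact ih (fun z hz => h z (by simp [hz]))

theorem pvLast_spaces (ss : List Char) (hne : ss ≠ []) (h : ∀ x ∈ ss, x = ' ') :
    ss.getLast? = some ' ' := by
  rw [List.getLast?_eq_some_getLast hne]
  exact congrArg some (h _ (List.getLast_mem hne))

theorem pvSplit_run (p : Char → Bool) (c : Char) (l : List Char) (hc : p c = true) :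
    ∃ a r, c :: l = a ++ r ∧ a ≠ [] ∧ (∀ x ∈ a, p x = true) ∧
      (∀ z, r.head? = some z → p z = false) := by
  refine ⟨(c :: l).takeWhile p, (c :: l).dropWhile p,
    (List.takeWhile_append_dropWhile).symm, ?_, ?_, ?_⟩
  · rw [List.takeWhile_cons]; simp [hc]
  · exact fun x hx => List.mem_takeWhile_imp hx
  · intro z hz
    have h1 := List.head?_dropWhile_not p (c :: l)
    cases hd : ((c :: l).dropWhile p).head? with
    | none => rw [hd] at hz; cases hz
    | some y =>
      rw [hd] at h1 hz
      cases hz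
      exact h1

theorem pvScan_main : ∀ (n : Nat) (cs : List Char), cs.length ≤ n →
    cs.head? ≠ some ' ' → cs.getLast? ≠ some ' ' →
    ∀ (out : List Char) (ps : Bool),
      (cs.foldl pvStepB (out, false, false, ps)).1 = out ++ pvF cs := by
  intro n
  induction n with
  | zero =>
    intro cs hlen _ _ out ps
    have hcs : cs = [] := List.eq_nil_of_length_eq_zero (Nat.le_zero.mp hlen)
    subst hcs
    simp [pvF, pvW_nil, PySem.Chars.join_nil]
  | succ m ih =>
    intro cs hlen hhead hlast out ps
    cases hcs : cs with
    | nil => simp [pvF, pvW_nil, PySem.Chars.join_nil]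
    | cons c cs₀ =>
      subst hcs
      have hch : c ≠ ' ' := by
        intro h; exact hhead (by rw [h]; rfl)
      obtain ⟨w, r, hdec, hwne, hwq, hrq⟩ :=
        pvSplit_run (fun x => !(x == ' ')) c cs₀ (by simp [hch])
      have hwsp : ∀ x ∈ w, x ≠ ' ' := by
        intro x hx
        have := hwq x hx
        simpa using this
      obtain ⟨hl', pd', hA⟩ := (pvScan_word w.length w le_rfl hwsp).1 hwne out false ps
      have hfold : (c :: cs₀).foldl pvStepB (out, false, false, ps)
          = r.foldl pvStepB (w.foldl pvStepB (out, false, false, ps)) := by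
        rw [hdec, List.foldl_append]
      rw [hfold, hA]
      cases hr : r with
      | nil =>
        subst hr
        rw [List.append_nil] at hdec
        rw [hdec]
        have hWw : pvW w = [w] := by
          have h0 := pvW_block w [] hwne hwsp (Or.inl rfl)
          rw [List.append_nil] at h0
          rw [h0, pvW_nil]
        simp [pvF, hWw, PySem.Chars.join_singleton, pvParteA_eq, pvG]
      | cons x r₁ =>
        subst hr
        have hx : x = ' ' := by
          have := hrq x (by simp)
          simpa using this
        subst hx
        obtain ⟨sr, t, hrdec, hsrne, hsrq, htq⟩ :=
          pvSplit_run (fun z => z == ' ') ' ' r₁ (by simp)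
        have hsrsp : ∀ z ∈ sr, z = ' ' := by
          intro z hz
          have := hsrq z hz
          simpa using this
        have hlastr : (' ' :: r₁).getLast? = (c :: cs₀).getLast? := by
          conv_rhs => rw [hdec]
          rw [List.getLast?_append,
            List.getLast?_eq_some_getLast (l := ' ' :: r₁) (by simp)]
          rfl
        have htne : t ≠ [] := by
          intro h0
          rw [h0, List.append_nil] at hrdec
          apply hlast
          rw [← hlastr, hrdec]
          exact pvLast_spaces sr hsrne hsrsp
        have hthead : t.head? ≠ some ' ' := by
          intro h0
          have := htq ' ' h0
          simp at this
        have htlast : t.getLast? ≠ some ' ' := by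
          rw [← hlastr, hrdec, List.getLast?_append] at hlast
          cases ht0 : t.getLast? with
          | none => simp
          | some z =>
            rw [ht0] at hlast
            simpa using hlast
        have htlen : t.length ≤ m := by
          have h1 : (c :: cs₀).length = w.length + (' ' :: r₁).length := by
            rw [hdec, List.length_append]
          have h2 : (' ' :: r₁).length = sr.length + t.length := by
            rw [hrdec, List.length_append]
          have h3 : 0 < w.length := List.length_pos_of_ne_nil hwne
          simp only [List.length_cons] at h1 h2 hlen
          omega
        have hfold2 : (' ' :: r₁).foldl pvStepB (out ++ pvG w, hl', pd', false)
            = t.foldl pvStepB (sr.foldl pvStepB (out ++ pvG w, hl', pd', false)) := by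
          rw [hrdec, List.foldl_append]
        rw [hfold2, pvScan_spaces sr hsrsp hsrne _ hl' pd',
          ih t htlen hthead htlast (out ++ pvG w ++ [' ']) true]
        have hWcs : pvW (c :: cs₀) = w :: pvW t := by
          rw [hdec, hrdec]
          rw [pvW_block w (sr ++ t) hwne hwsp
            (Or.inr (by cases sr with
              | nil => exact absurd rfl hsrne
              | cons u su => rw [hsrsp u (by simp)]; rfl))]
          rw [pvW_spaces_prefix sr hsrsp t]
        obtain ⟨u, us, hu⟩ := List.exists_cons_of_ne_nil (pvW_ne_nil t htne hthead)
        have hFcs : pvF (c :: cs₀) = pvG w ++ ' ' :: pvF t := by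
          rw [pvF, hWcs, hu, List.map_cons, List.map_cons, PySem.Chars.join_cons_cons]
          rw [pvF, hu, List.map_cons, pvParteA_eq, pvG]
          simp
        rw [hFcs]
        simp

theorem pvStrip_head (l : List Char) : (PySem.Chars.strip l).head? ≠ some ' ' := by
  intro h
  have hpre : PySem.Chars.strip l <+: PySem.Chars.lstrip l := by
    rw [PySem.Chars.strip, PySem.Chars.rstrip]
    have hs := List.dropWhile_suffix (l := (PySem.Chars.lstrip l).reverse) PySem.Chars.isspace
    exact List.reverse_suffix.mp (by simpa using hs)
  obtain ⟨tl, htl⟩ := hpre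
  have hy : (PySem.Chars.lstrip l).head? = some ' ' := by
    cases hst : PySem.Chars.strip l with
    | nil => rw [hst] at h; cases h
    | cons z zs =>
      rw [hst] at h htl
      simp only [List.head?_cons] at h
      cases h
      rw [← htl]
      rfl
  have h1 := List.head?_dropWhile_not PySem.Chars.isspace l
  rw [show List.dropWhile PySem.Chars.isspace l = PySem.Chars.lstrip l from rfl, hy] at h1
  exact absurd h1 (by decide)

theorem pvStrip_last (l : List Char) : (PySem.Chars.strip l).getLast? ≠ some ' ' := by
  intro h
  rw [PySem.Chars.strip, PySem.Chars.rstrip, List.getLast?_reverse] at h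
  have h1 := List.head?_dropWhile_not PySem.Chars.isspace (PySem.Chars.lstrip l).reverse
  rw [h] at h1
  exact absurd h1 (by decide)

-- ===== VERDICT (by name: the statement is the Claim_ definition above) =====
theorem formatar_nome_py_spec : Claim_equal_formatar_nome_py := by
  intro valor _
  unfold Spec_formatar_nome_py formatar_nome_py formatar_nome_py_alt
  cases valor with
  | none => rfl
  | some s =>
    simp only
    by_cases hs : s.toList.isEmpty
    · simp [hs]
    · simp only [hs]
      rw [PySem.List.foldl_append_singleton_eq_map]
      rw [pvScan_main (PySem.Chars.strip s.toList).length _ le_rfl (pvStrip_head _) (pvStrip_last _)]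
      simp [pvF, pvW, pvSplitOn_eq]
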